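-- pv_equiv track=rewrite | github.com/avis001/PythPlayground | PyFiles/bootDOTdev/medidate.py | meditate
-- ===== SOURCE A (Python) =====
-- def meditate(mana, max_mana, energy, energy_potions):
--     while mana < max_mana and (energy > 0 or energy_potions > 0):
--         if energy == 0:
--             energy_potions -= 1
--             energy += 50
--
--         energy -= 1
--         mana += 3
--         mana = min(mana, max_mana)
--
--     return mana, energy, energy_potions
-- ===== SOURCE B (Python) =====
-- def meditate(mana, max_mana, energy, energy_potions):
--     if mana >= max_mana:
--         return mana, energy, energy_potions
--     need = -((mana - max_mana) // 3)          # ceil((max_mana - mana) / 3)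
--     steps = min(need, energy + 50 * energy_potions)
--     mana = min(mana + 3 * steps, max_mana)
--     if steps <= energy:
--         return mana, energy - steps, energy_potions
--     drawn = steps - energy                    # steps powered by potion energy
--     potions = -(-drawn // 50)                 # potions opened
--     return mana, 50 * potions - drawn, energy_potions - potions
-- ===== Notes on version B (the rewrite author's own statement) =====
-- stated objective: faster
-- what changed: Replaced the one-mana-tick-at-a-time simulation loop with closed-form arithmetic (ceiling divisions give the ticks needed, the ticks affordable and the potions opened); Pre_ restricts to the natural domain — nonnegative energy and potion counts, or mana already full — outside which neither behaviour is specified.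
-- outside the precondition, e.g. on meditate(0, 10, -2, 1): A returns (10, -6, 1), B returns (10, 44, 0); on meditate(0, 10, 5, -1): A returns (10, 1, -1), B returns (-135, 50, -1)
import Mathlib
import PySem

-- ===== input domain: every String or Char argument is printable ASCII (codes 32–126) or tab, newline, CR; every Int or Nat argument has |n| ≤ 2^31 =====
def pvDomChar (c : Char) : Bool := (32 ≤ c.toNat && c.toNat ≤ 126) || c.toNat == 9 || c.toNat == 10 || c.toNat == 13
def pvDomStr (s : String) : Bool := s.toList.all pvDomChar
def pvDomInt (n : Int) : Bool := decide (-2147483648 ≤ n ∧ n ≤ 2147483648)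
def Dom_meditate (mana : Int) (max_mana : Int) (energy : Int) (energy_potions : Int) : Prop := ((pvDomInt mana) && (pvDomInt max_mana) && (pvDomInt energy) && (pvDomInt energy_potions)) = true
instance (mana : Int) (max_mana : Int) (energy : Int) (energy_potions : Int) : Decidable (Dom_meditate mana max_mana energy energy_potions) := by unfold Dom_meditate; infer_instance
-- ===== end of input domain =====

-- B replaces A's one-tick-at-a-time regeneration loop with closed-form arithmetic (faster: O(1) vs O(gap)).

-- ===== PORT A =====
def meditate (mana : Int) (max_mana : Int) (energy : Int) (energy_potions : Int) : List Int :=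
  if _h : mana < max_mana ∧ (energy > 0 ∨ energy_potions > 0) then
    if energy = 0 then
      -- energy_potions -= 1; energy += 50; then: energy -= 1; mana += 3; mana = min(mana, max_mana)
      meditate (min (mana + 3) max_mana) max_mana (energy + 50 - 1) (energy_potions - 1)
    else
      meditate (min (mana + 3) max_mana) max_mana (energy - 1) energy_potions
  else
    [mana, energy, energy_potions]
termination_by (max_mana - mana).toNat
decreasing_by all_goals omega

-- ===== PORT B =====
def meditate_alt (mana : Int) (max_mana : Int) (energy : Int) (energy_potions : Int) : List Int :=
  if max_mana ≤ mana then [mana, energy, energy_potions]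
  else
    let need := -(PySem.Int.floordiv (mana - max_mana) 3)
    let steps := min need (energy + 50 * energy_potions)
    let mana' := min (mana + 3 * steps) max_mana
    if steps ≤ energy then [mana', energy - steps, energy_potions]
    else
      let drawn := steps - energy
      let potions := -(PySem.Int.floordiv (-drawn) 50)
      [mana', 50 * potions - drawn, energy_potions - potions]

-- ===== PRECONDITION & SPEC =====
-- Pre_ restricts to the natural domain: nonnegative energy and potion counts, or mana already full
-- (then the loop never runs); outside it neither behaviour is specified.
def Pre_meditate (mana : Int) (max_mana : Int) (energy : Int) (energy_potions : Int) : Prop :=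
  (0 ≤ energy ∧ 0 ≤ energy_potions) ∨ max_mana ≤ mana
instance (mana : Int) (max_mana : Int) (energy : Int) (energy_potions : Int) : Decidable (Pre_meditate mana max_mana energy energy_potions) := by unfold Pre_meditate; infer_instance
def pvWitness_meditate : Int × Int × Int × Int := (1, 20, 2, 1)

def Spec_meditate (mana : Int) (max_mana : Int) (energy : Int) (energy_potions : Int) (out : List Int) : Prop := out = meditate_alt mana max_mana energy energy_potions
instance (mana : Int) (max_mana : Int) (energy : Int) (energy_potions : Int) (out : List Int) : Decidable (Spec_meditate mana max_mana energy energy_potions out) := by unfold Spec_meditate; infer_instance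

-- ===== CLAIM =====
def Claim_equal_meditate : Prop := ∀ (mana : Int) (max_mana : Int) (energy : Int) (energy_potions : Int), Dom_meditate mana max_mana energy energy_potions → Pre_meditate mana max_mana energy energy_potions → Spec_meditate mana max_mana energy energy_potions (meditate mana max_mana energy energy_potions)

-- ===== LEMMAS AND PROOFS =====
theorem fd3 (a : Int) : PySem.Int.floordiv a 3 = a / 3 :=
  PySem.Int.floordiv_eq_ediv_of_pos (by norm_num)

theorem fd50 (a : Int) : PySem.Int.floordiv a 50 = a / 50 :=
  PySem.Int.floordiv_eq_ediv_of_pos (by norm_num)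

-- abbreviations for B's intermediate quantities (proof-side only)
def needf (m M : Int) : Int := -((m - M) / 3)
def stepsf (m M e p : Int) : Int := min (needf m M) (e + 50 * p)

-- evaluation lemmas: meditate_alt on each of its branches
theorem altB1 (m M e p : Int) (h : M ≤ m) : meditate_alt m M e p = [m, e, p] := by
  simp only [meditate_alt]
  rw [if_pos h]

theorem altB4 (m M e p : Int) (h : m < M) (hs : stepsf m M e p ≤ e) :
    meditate_alt m M e p = [min (m + 3 * stepsf m M e p) M, e - stepsf m M e p, p] := by
  simp only [meditate_alt, fd3, needf, stepsf] at *
  rw [if_neg (by omega : ¬ M ≤ m), if_pos hs]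

theorem altB5 (m M e p : Int) (h : m < M) (hs : ¬ stepsf m M e p ≤ e) :
    meditate_alt m M e p = [min (m + 3 * stepsf m M e p) M,
      50 * (-(-(stepsf m M e p - e) / 50)) - (stepsf m M e p - e),
      p - (-(-(stepsf m M e p - e) / 50))] := by
  simp only [meditate_alt, fd3, fd50, needf, stepsf] at *
  rw [if_neg (by omega : ¬ M ≤ m), if_neg hs]

-- one loop iteration with energy > 0 leaves B's closed form invariant
theorem alt_step (m M e p : Int) (h1 : m < M) (he : 0 < e) (hp : 0 ≤ p) :
    meditate_alt m M e p = meditate_alt (min (m + 3) M) M (e - 1) p := by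
  by_cases hm : m + 3 < M
  · rw [show min (m + 3) M = m + 3 from by omega]
    have hstep : stepsf (m + 3) M (e - 1) p = stepsf m M e p - 1 := by
      simp only [stepsf, needf]; omega
    by_cases hs : stepsf m M e p ≤ e
    · rw [altB4 m M e p h1 hs, altB4 (m + 3) M (e - 1) p hm (by omega), hstep]
      simp only [List.cons.injEq, and_true]
      omega
    · rw [altB5 m M e p h1 hs, altB5 (m + 3) M (e - 1) p hm (by omega), hstep]
      simp only [List.cons.injEq, and_true]
      omega
  · rw [show min (m + 3) M = M from by omega, altB1 M M (e - 1) p le_rfl]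
    have hs : stepsf m M e p ≤ e := by
      simp only [stepsf, needf]; omega
    rw [altB4 m M e p h1 hs]
    have : stepsf m M e p = 1 := by
      simp only [stepsf, needf]; omega
    simp only [this, List.cons.injEq, and_true]
    omega

-- one loop iteration with energy = 0 (a potion is consumed)
theorem alt_step0 (m M p : Int) (h1 : m < M) (hp : 0 < p) :
    meditate_alt m M 0 p = meditate_alt (min (m + 3) M) M 49 (p - 1) := by
  have hs : ¬ stepsf m M 0 p ≤ 0 := by
    simp only [stepsf, needf]; omega
  rw [altB5 m M 0 p h1 hs]
  by_cases hm : m + 3 < M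
  · rw [show min (m + 3) M = m + 3 from by omega]
    have hstep : stepsf (m + 3) M 49 (p - 1) = stepsf m M 0 p - 1 := by
      simp only [stepsf, needf]; omega
    by_cases hs' : stepsf (m + 3) M 49 (p - 1) ≤ 49
    · rw [altB4 (m + 3) M 49 (p - 1) hm hs', hstep]
      simp only [List.cons.injEq, and_true]
      omega
    · rw [altB5 (m + 3) M 49 (p - 1) hm hs', hstep]
      simp only [List.cons.injEq, and_true]
      omega
  · rw [show min (m + 3) M = M from by omega, altB1 M M 49 (p - 1) le_rfl]
    have : stepsf m M 0 p = 1 := by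
      simp only [stepsf, needf]; omega
    simp only [this, List.cons.injEq, and_true]
    omega

theorem med_eq (m M e p : Int) (he : 0 ≤ e) (hp : 0 ≤ p) :
    meditate m M e p = meditate_alt m M e p := by
  revert he hp
  induction m, e, p using meditate.induct M with
  | case1 m p h ih =>
      intro _ hp
      have hp' : 0 < p := h.2.resolve_left (by omega)
      rw [meditate]
      simp only [h]
      rw [ih (by omega) (by omega)]
      norm_num
      exact (alt_step0 m M p h.1 hp').symm
  | case2 m e p h he ih =>
      intro he' hp
      have hE : 0 < e := by omega
      rw [meditate]
      simp only [h, if_neg he]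
      rw [ih (by omega) hp]
      exact (alt_step m M e p h.1 hE hp).symm
  | case3 m e p h =>
      intro he hp
      rw [meditate]
      simp only [h, dif_neg, not_false_iff]
      by_cases hm : m < M
      · have hp0 : p = 0 := by omega
        have he0 : e = 0 := by omega
        subst hp0; subst he0
        have hs0 : stepsf m M 0 0 = 0 := by
          simp only [stepsf, needf]; omega
        rw [altB4 m M 0 0 hm (by omega)]
        simp only [hs0, List.cons.injEq, and_true]
        omega
      · exact (altB1 m M e p (by omega)).symm

-- ===== VERDICT =====
theorem meditate_spec : Claim_equal_meditate := by
  intro m M e p _ hpre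
  rcases hpre with ⟨he, hp⟩ | hfull
  · exact med_eq m M e p he hp
  · show _ = _
    rw [meditate, dif_neg (by omega), altB1 m M e p hfull]
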